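-- pv_equiv track=rewrite | github.com/smashbeat/crewai-biolit-blog | scripts/qa_fix_markdown.py | collapse_blank_lines_outside_code
-- ===== SOURCE A (Python) =====
-- def collapse_blank_lines_outside_code(body: str) -> str:
--     lines = body.splitlines()
--     out = []
--     in_code = False
--     blank_streak = 0
--     for ln in lines:
--         if ln.strip().startswith("```"):
--             in_code = not in_code
--             out.append(ln)
--             blank_streak = 0
--             continue
--         if not in_code:
--             if ln.strip() == "":
--                 blank_streak += 1
--                 if blank_streak <= 1:
--                     out.append("")
--                 # else skip extra blanks
--             else:
--                 blank_streak = 0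
--                 out.append(ln)
--         else:
--             out.append(ln)
--     return "\n".join(out) + ("\n" if body.endswith("\n") else "")
-- ===== SOURCE B (Python) =====
-- def collapse_blank_lines_outside_code(body: str) -> str:
--     def collapse(buf):
--         # one "" per maximal run of blank lines, non-blank lines verbatim
--         res = []
--         n = len(buf)
--         for i in range(n):
--             if buf[i].strip() == "":
--                 if i + 1 < n and buf[i + 1].strip() == "":
--                     continue  # not the last blank of its run
--                 res.append("")
--             else:
--                 res.append(buf[i])
--         return res
--
--     out = []
--     buf = []
--     in_code = False
--     for ln in body.splitlines():
--         if ln.strip().startswith("```"):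
--             out.extend(buf if in_code else collapse(buf))
--             out.append(ln)
--             buf = []
--             in_code = not in_code
--         else:
--             buf.append(ln)
--     out.extend(buf if in_code else collapse(buf))
--     return "\n".join(out) + ("\n" if body.endswith("\n") else "")
-- ===== Notes on version B (the rewrite author's own statement) =====
-- stated objective: alternative
-- what changed: B partitions the lines into fence-delimited segments (flushing a buffer at each fence and at the end) and collapses each outside-code segment's blank runs with a lookahead pass, instead of A's single per-line loop with a blank_streak counter.
import Mathlib
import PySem

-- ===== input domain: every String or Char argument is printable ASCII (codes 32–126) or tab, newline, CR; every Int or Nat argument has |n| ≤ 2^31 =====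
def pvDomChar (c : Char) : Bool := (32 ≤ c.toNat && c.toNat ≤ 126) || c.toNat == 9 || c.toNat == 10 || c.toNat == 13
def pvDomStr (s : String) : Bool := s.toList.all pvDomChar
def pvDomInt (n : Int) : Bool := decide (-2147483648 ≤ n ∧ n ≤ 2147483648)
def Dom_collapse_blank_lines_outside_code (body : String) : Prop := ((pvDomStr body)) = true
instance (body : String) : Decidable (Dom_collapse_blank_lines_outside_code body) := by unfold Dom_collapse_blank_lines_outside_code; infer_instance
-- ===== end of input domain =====

-- B partitions the lines into fence-delimited segments and collapses blank runs per segment (outside code) instead of A's per-line blank counter; objective: alternative decomposition, same cost.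

-- shared helpers: `ln.strip().startswith("```")` and `ln.strip() == ""`
def pvFence (ln : String) : Bool := PySem.Str.startswith (PySem.Str.strip ln) "```"
def pvBlank (ln : String) : Bool := PySem.Str.strip ln == ""

-- ===== PORT A =====
-- A's single loop: state = (accumulated out, in_code, blank_streak)
def aLoop : List String → List String → Bool → Nat → List String
  | [], out, _inCode, _blank => out
  | ln :: rest, out, inCode, blank =>
    if pvFence ln then
      aLoop rest (out ++ [ln]) (!inCode) 0
    else if !inCode then
      if pvBlank ln then
        if blank + 1 ≤ 1 then aLoop rest (out ++ [""]) inCode (blank + 1)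
        else aLoop rest out inCode (blank + 1)
      else aLoop rest (out ++ [ln]) inCode 0
    else aLoop rest (out ++ [ln]) inCode blank

def collapse_blank_lines_outside_code (body : String) : String :=
  PySem.Str.join "\n" (aLoop (PySem.Str.splitlines body) [] false 0) ++
    (if PySem.Str.endswith body "\n" then "\n" else "")

-- ===== PORT B =====
-- Source B's `collapse`: for each line, a blank followed by another blank is skipped,
-- the last blank of a run becomes "", non-blank lines are kept verbatim.
def bCollapse : List String → List String
  | [] => []
  | x :: rest =>
    if pvBlank x then
      match rest with
      | y :: _ => if pvBlank y then bCollapse rest else "" :: bCollapse rest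
      | [] => [""]
    else x :: bCollapse rest

-- Source B's main loop: state = (out, segment buffer, in_code); flush on each fence and at the end
def bLoop : List String → List String → List String → Bool → List String
  | [], out, buf, inCode => out ++ (if inCode then buf else bCollapse buf)
  | ln :: rest, out, buf, inCode =>
    if pvFence ln then
      bLoop rest (out ++ (if inCode then buf else bCollapse buf) ++ [ln]) [] (!inCode)
    else
      bLoop rest out (buf ++ [ln]) inCode

def collapse_blank_lines_outside_code_alt (body : String) : String :=
  PySem.Str.join "\n" (bLoop (PySem.Str.splitlines body) [] [] false) ++
    (if PySem.Str.endswith body "\n" then "\n" else "")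

-- ===== PRECONDITION & SPEC =====
def Spec_collapse_blank_lines_outside_code (body : String) (out : String) : Prop := out = collapse_blank_lines_outside_code_alt body
instance (body : String) (out : String) : Decidable (Spec_collapse_blank_lines_outside_code body out) := by unfold Spec_collapse_blank_lines_outside_code; infer_instance

-- ===== CLAIM (what is proved, stated in full; the proofs are below) =====
def Claim_equal_collapse_blank_lines_outside_code : Prop := ∀ (body : String), Dom_collapse_blank_lines_outside_code body → Spec_collapse_blank_lines_outside_code body (collapse_blank_lines_outside_code body)

-- ===== LEMMAS AND PROOFS =====

-- whether a buffer ends in a blank line (mirrors A's blank_streak ≠ 0)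
def endsBlank (l : List String) : Bool := (l.getLast?.map pvBlank).getD false

theorem endsBlank_concat (l : List String) (x : String) : endsBlank (l ++ [x]) = pvBlank x := by
  simp [endsBlank]

theorem bCollapse_cons₂ (x y : String) (t : List String) :
    bCollapse (x :: y :: t) =
      (if pvBlank x then (if pvBlank y then [] else [""]) else [x]) ++ bCollapse (y :: t) := by
  by_cases hx : pvBlank x = true <;> by_cases hy : pvBlank y = true <;>
    simp [bCollapse, hx, hy]

theorem bCollapse_concat_blank (buf : List String) (b : String) (hb : pvBlank b = true) :
    bCollapse (buf ++ [b]) = bCollapse buf ++ (if endsBlank buf then [] else [""]) := by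
  induction buf with
  | nil => simp [bCollapse, endsBlank, hb]
  | cons a rest ih =>
    cases rest with
    | nil => by_cases ha : pvBlank a = true <;> simp [bCollapse, endsBlank, ha, hb]
    | cons y rest' =>
      have h1 : endsBlank (a :: y :: rest') = endsBlank (y :: rest') := by simp [endsBlank]
      show bCollapse (a :: y :: (rest' ++ [b])) = _
      rw [bCollapse_cons₂, show y :: (rest' ++ [b]) = (y :: rest') ++ [b] from rfl, ih,
        h1, bCollapse_cons₂, List.append_assoc]

theorem bCollapse_concat_nonblank (buf : List String) (x : String) (hx : pvBlank x = false) :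
    bCollapse (buf ++ [x]) = bCollapse buf ++ [x] := by
  induction buf with
  | nil => simp [bCollapse, hx]
  | cons a rest ih =>
    cases rest with
    | nil => by_cases ha : pvBlank a = true <;> simp [bCollapse, ha, hx]
    | cons y rest' =>
      show bCollapse (a :: y :: (rest' ++ [x])) = _
      rw [bCollapse_cons₂, show y :: (rest' ++ [x]) = (y :: rest') ++ [x] from rfl, ih,
        bCollapse_cons₂, List.append_assoc]

theorem loop_eq (lines : List String) : ∀ (out buf : List String) (inCode : Bool) (blank : Nat),
    (inCode = false → ((blank = 0) ↔ endsBlank buf = false)) →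
    aLoop lines (out ++ (if inCode then buf else bCollapse buf)) inCode blank
      = bLoop lines out buf inCode := by
  induction lines with
  | nil => intro out buf inCode blank _; simp [aLoop, bLoop]
  | cons ln rest ih =>
    intro out buf inCode blank hinv
    by_cases hf : pvFence ln = true
    · simp only [aLoop, bLoop, hf, if_true]
      have := ih (out ++ (if inCode then buf else bCollapse buf) ++ [ln]) [] (!inCode) 0
        (by intro _; simp [endsBlank])
      simpa [bCollapse] using this
    · cases inCode with
      | true =>
        simp only [aLoop, bLoop, hf, Bool.not_true, if_true]
        have := ih out (buf ++ [ln]) true blank (by intro h; cases h)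
        simpa [List.append_assoc] using this
      | false =>
        have hEB := hinv rfl
        by_cases hb : pvBlank ln = true
        · by_cases h0 : blank = 0
          · have hend : endsBlank buf = false := (hEB.mp h0)
            have := ih out (buf ++ [ln]) false (blank + 1)
              (by intro _; constructor
                  · intro h; omega
                  · intro h; rw [endsBlank_concat, hb] at h; cases h)
            rw [bCollapse_concat_blank buf ln hb, hend] at this
            simp only [aLoop, bLoop, hf, Bool.not_false, if_true, hb, h0] at *
            simpa [List.append_assoc] using this
          · have hend : endsBlank buf = true := by
              cases h : endsBlank buf with
              | false => exact absurd (hEB.mpr h) h0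
              | true => rfl
            have := ih out (buf ++ [ln]) false (blank + 1)
              (by intro _; constructor
                  · intro h; omega
                  · intro h; rw [endsBlank_concat, hb] at h; cases h)
            rw [bCollapse_concat_blank buf ln hb, hend] at this
            have hgt : ¬ (blank + 1 ≤ 1) := by omega
            simp only [aLoop, bLoop, hf, Bool.not_false, if_true, hb, hgt] at *
            simpa using this
        · have := ih out (buf ++ [ln]) false 0
            (by intro _; rw [endsBlank_concat]; simp [hb])
          rw [bCollapse_concat_nonblank buf ln (by simpa using hb)] at this
          simp only [aLoop, bLoop, hf, Bool.not_false, if_true, hb] at *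
          simpa [List.append_assoc] using this

-- ===== VERDICT (by name: the statement is the Claim_ definition above) =====
theorem collapse_blank_lines_outside_code_spec : Claim_equal_collapse_blank_lines_outside_code := by
  intro body _
  unfold Spec_collapse_blank_lines_outside_code
  unfold collapse_blank_lines_outside_code collapse_blank_lines_outside_code_alt
  have := loop_eq (PySem.Str.splitlines body) [] [] false 0 (by intro _; simp [endsBlank])
  rw [← this]
  simp [bCollapse]
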